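-- pv_equiv track=rewrite | github.com/lswzjuer/pytorch-quantity | tmp_lizili/roadtensor/components/tools/quantity/activation_quantizer.py | prune_net_info
-- ===== SOURCE A (Python) =====
-- from collections import OrderedDict, defaultdict, Counter
--
-- def prune_net_info(net_info, keep_node_list):
--     all_op_names = set(list(net_info.keys()))
--     prune_op_names = all_op_names - set(keep_node_list)
--     keys = list(net_info.keys())[::-1]
--     net_info_rev, net_info_new = OrderedDict(), OrderedDict()
--     for k in keys:
--         net_info_rev[k] = net_info[k]
--
--     def _dfs(name):
--         """
--         Start from prune op, the input length must be 1.
--         """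
--         info = net_info_rev[name]
--         assert len(info['inputs']) <= 1, (info['inputs'], name)
--         if len(info['inputs']) == 0:
--             return None
--
--         inp = info['inputs'][0]
--
--         if inp in prune_op_names:
--             return _dfs(inp)
--         else:
--             return inp
--
--     for name, info in net_info_rev.items():
--         if name in prune_op_names:
--             continue
--
--         for ind in range(len(info['inputs'])):
--             inp = info['inputs'][ind]
--             if inp in prune_op_names:
--                 info['inputs'][ind] = _dfs(inp)
--
--     for k in net_info.keys():
--         if k not in prune_op_names:
--             net_info_new[k] = net_info_rev[k]
--
--     return net_info_new
-- ===== SOURCE B (Python) =====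
-- # B: pointer-doubling resolution of pruned chains instead of A's reversed
-- # dict copy + per-occurrence recursive chain walk.  Return-value equivalence only: like
-- # A, B mutates the kept infos' 'inputs' in place (A rewrites elements, B rebinds the list).
-- from collections import OrderedDict
--
--
-- def prune_net_info(net_info, keep_node_list):
--     keep = set(keep_node_list)
--     nxt = {}
--     for name, info in net_info.items():
--         if name not in keep:
--             inputs = info.get('inputs', ())
--             if len(inputs) == 1:
--                 nxt[name] = inputs[0]
--     # pointer doubling: after r rounds each entry skips 2**r chain steps
--     for _ in range(max(1, len(net_info)).bit_length()):
--         nxt = {k: nxt.get(v, v) for k, v in nxt.items()}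
--     out = OrderedDict()
--     for name, info in net_info.items():
--         if name in keep:
--             info['inputs'] = [nxt.get(x, x) for x in info['inputs']]
--             out[name] = info
--     return out
-- ===== Notes on version B (the rewrite author's own statement) =====
-- stated objective: alternative
-- what changed: Replaces A's reversed-dict copy plus per-occurrence recursive chain walk (_dfs) by one pass that collects each pruned node's single input, pointer-doubling rounds that resolve every pruned chain at once, and one rewrite pass over the kept entries.
import Mathlib
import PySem

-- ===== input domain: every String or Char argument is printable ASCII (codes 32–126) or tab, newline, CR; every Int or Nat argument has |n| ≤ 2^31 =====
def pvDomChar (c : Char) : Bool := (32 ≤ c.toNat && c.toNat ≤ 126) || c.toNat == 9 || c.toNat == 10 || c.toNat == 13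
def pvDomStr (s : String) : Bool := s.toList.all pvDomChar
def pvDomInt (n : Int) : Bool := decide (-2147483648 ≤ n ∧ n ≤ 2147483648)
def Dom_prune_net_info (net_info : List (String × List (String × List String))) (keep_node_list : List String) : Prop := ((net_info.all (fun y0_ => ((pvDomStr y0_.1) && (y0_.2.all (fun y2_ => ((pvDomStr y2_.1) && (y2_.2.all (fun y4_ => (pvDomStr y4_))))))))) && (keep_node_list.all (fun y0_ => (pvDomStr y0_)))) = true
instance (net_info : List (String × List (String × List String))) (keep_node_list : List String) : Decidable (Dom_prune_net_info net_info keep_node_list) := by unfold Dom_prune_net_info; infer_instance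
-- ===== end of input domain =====

-- B replaces A's reversed-dict copy + per-occurrence recursive chain walk (_dfs) by a
-- pointer-doubling resolution of the pruned chains; equivalence is about the RETURN
-- value only (both Pythons mutate the kept infos' 'inputs' in place).

-- ===== PORT A =====
-- Both arguments typed dict in Python; the ports view the assoc lists through PySem.Dict.
def pvND (net_info : List (String × List (String × List String))) :
    PySem.Dict String (List (String × List String)) := PySem.Dict.ofList net_info

-- prune_op_names = set(net_info.keys()) - set(keep_node_list)
def pvPruneSet (net_info : List (String × List (String × List String)))
    (keep_node_list : List String) : PySem.Set String :=
  PySem.Set.diff (PySem.Set.ofList (pvND net_info).keys) (PySem.Set.ofList keep_node_list)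

-- net_info_rev: for k in list(net_info.keys())[::-1]: net_info_rev[k] = net_info[k]
-- (getD's default is unreachable: k comes from net_info.keys())
def pvRev0 (net_info : List (String × List (String × List String))) :
    PySem.Dict String (List (String × List String)) :=
  ((pvND net_info).keys.reverse).foldl
    (fun d k => d.insert k ((pvND net_info).getD k [])) PySem.Dict.empty

-- _dfs.  `none` marks exactly where the Python raises (KeyError / failed assert /
-- unbounded recursion on a cycle) or returns None — all excluded by Pre_; the fuel
-- (always ≥ dict size + 1 at the call sites) only makes the recursion structural.
def pvDfsA (rev : PySem.Dict String (List (String × List String)))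
    (prune : PySem.Set String) : Nat → String → Option String
  | 0, _ => none
  | fuel+1, name =>
    match rev.get? name with
    | none => none                                   -- KeyError (name not a key)
    | some info =>
      match (PySem.Dict.ofList info).get? "inputs" with
      | none => none                                 -- KeyError ('inputs' missing)
      | some inputs =>
        match inputs with
        | [] => none                                 -- Python returns None here
        | [inp] => if prune.contains inp then pvDfsA rev prune fuel inp else some inp
        | _ => none                                  -- assert len(info['inputs']) <= 1 fails

-- the index loop: for ind in range(len(info['inputs'])): if pruned: info['inputs'][ind] = _dfs(...)
-- (the index is always in range, so inp = info['inputs'][ind] is pyGetD as in PYSEM's index-loop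
-- convention; Python writes _dfs's result, which under Pre_ is never None, so getD's default is unreachable)
def pvRewriteA (rev : PySem.Dict String (List (String × List String)))
    (prune : PySem.Set String) (fuel : Nat) (inputs : List String) : List String :=
  (PySem.List.pyRange 0 inputs.length 1).foldl
    (fun acc i =>
      if prune.contains (PySem.List.pyGetD acc i "") then
        acc.set i.toNat
          ((pvDfsA rev prune fuel (PySem.List.pyGetD acc i "")).getD (PySem.List.pyGetD acc i ""))
      else acc)
    inputs

-- the middle loop body: Python mutates info['inputs'] of the kept entries of net_info_rev
-- in place; _dfs only ever reads pruned entries, which this loop never touches, so it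
-- reads the untouched pvRev0.  A missing 'inputs' key is a KeyError (outside Pre_).
def pvStepMidA (rev : PySem.Dict String (List (String × List String)))
    (prune : PySem.Set String) (fuel : Nat)
    (d : PySem.Dict String (List (String × List String)))
    (p : String × List (String × List String)) :
    PySem.Dict String (List (String × List String)) :=
  if prune.contains p.1 then d
  else
    match (PySem.Dict.ofList p.2).get? "inputs" with
    | none => d
    | some inputs =>
      d.insert p.1 ((PySem.Dict.ofList p.2).insert "inputs" (pvRewriteA rev prune fuel inputs)).items

def pvRev1 (net_info : List (String × List (String × List String)))
    (keep_node_list : List String) : PySem.Dict String (List (String × List String)) :=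
  (pvRev0 net_info).items.foldl
    (pvStepMidA (pvRev0 net_info) (pvPruneSet net_info keep_node_list) (net_info.length + 1))
    (pvRev0 net_info)

def prune_net_info (net_info : List (String × List (String × List String))) (keep_node_list : List String) : List (String × List (String × List String)) :=
  ((pvND net_info).keys.foldl
    (fun (acc : PySem.Dict String (List (String × List String))) k =>
      if (pvPruneSet net_info keep_node_list).contains k then acc
      else acc.insert k ((pvRev1 net_info keep_node_list).getD k []))
    PySem.Dict.empty).items

-- ===== PORT B =====
-- first loop body: if name not in keep: inputs = info.get('inputs', ());
--                  if len(inputs) == 1: nxt[name] = inputs[0]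
def pvStepB (keepS : PySem.Set String) (r : PySem.Dict String String)
    (p : String × List (String × List String)) : PySem.Dict String String :=
  if keepS.contains p.1 then r
  else
    match (PySem.Dict.ofList p.2).getD "inputs" [] with
    | [inp] => r.insert p.1 inp
    | _ => r

def pvBaseB (net_info : List (String × List (String × List String)))
    (keep_node_list : List String) : PySem.Dict String String :=
  (PySem.Dict.ofList net_info).items.foldl
    (pvStepB (PySem.Set.ofList keep_node_list)) PySem.Dict.empty

-- one doubling round: nxt = {k: nxt.get(v, v) for k, v in nxt.items()}
def pvDouble (d : PySem.Dict String String) : PySem.Dict String String :=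
  PySem.Dict.ofList (d.items.map (fun p => (p.1, d.getD p.2 p.2)))

-- rounds = max(1, len(net_info)).bit_length()
def pvRounds (net_info : List (String × List (String × List String))) : Nat :=
  PySem.Int.bitLength ((max 1 (PySem.Dict.ofList net_info).size : Nat) : Int)

def pvNxtB (net_info : List (String × List (String × List String)))
    (keep_node_list : List String) : PySem.Dict String String :=
  (List.range (pvRounds net_info)).foldl (fun d _ => pvDouble d) (pvBaseB net_info keep_node_list)

-- last loop: kept entries get info['inputs'] = [nxt.get(x, x) for x in info['inputs']]
-- (a missing 'inputs' key on a kept entry is a KeyError, as in A; outside Pre_)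
def prune_net_info_alt (net_info : List (String × List (String × List String))) (keep_node_list : List String) : List (String × List (String × List String)) :=
  ((PySem.Dict.ofList net_info).items.foldl
    (fun (acc : PySem.Dict String (List (String × List String))) p =>
      if (PySem.Set.ofList keep_node_list).contains p.1 then
        match (PySem.Dict.ofList p.2).get? "inputs" with
        | none => acc
        | some inputs =>
          acc.insert p.1
            ((PySem.Dict.ofList p.2).insert "inputs"
              (inputs.map (fun x => (pvNxtB net_info keep_node_list).getD x x))).items
      else acc)
    PySem.Dict.empty).items

-- ===== PRECONDITION & SPEC =====
-- x is a name the function prunes: a dict key not in keep_node_list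
def pvIsPruned (net_info : List (String × List (String × List String)))
    (keep_node_list : List String) (x : String) : Bool :=
  (net_info.map Prod.fst).contains x && !keep_node_list.contains x

-- shape of the input graph below x: every pruned node on the chain from x has exactly
-- one input and the chain is acyclic (so it leaves the pruned nodes within the number
-- of dict keys; the bound net_info.length + 1 used in Pre_ is NOT a size cap — an
-- acyclic chain of distinct keys is never longer)
def pvChainOk (net_info : List (String × List (String × List String)))
    (keep_node_list : List String) : Nat → String → Bool
  | 0, _ => false
  | f+1, x =>
    if pvIsPruned net_info keep_node_list x then
      match net_info.find? (fun e => e.1 == x) with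
      | none => false
      | some e =>
        match (PySem.Dict.ofList e.2).getD "inputs" [] with
        | [i] => pvChainOk net_info keep_node_list f i
        | _ => false
    else true

-- Pre_ excludes exactly the inputs on which A raises or returns a value outside the
-- declared type: duplicate keys (the arguments are Python dicts, which cannot carry
-- them), kept entries without an 'inputs' key (KeyError), and kept entries whose
-- inputs reach a pruned chain with a node lacking exactly one input ('inputs' missing:
-- KeyError; empty: None leaks into a list of str; two or more: AssertionError) or a
-- cyclic pruned chain (RecursionError).
def Pre_prune_net_info (net_info : List (String × List (String × List String))) (keep_node_list : List String) : Prop :=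
  (net_info.map Prod.fst).Nodup ∧
  (∀ e ∈ net_info, (e.2.map Prod.fst).Nodup) ∧
  (∀ e ∈ net_info, e.1 ∈ keep_node_list → "inputs" ∈ e.2.map Prod.fst) ∧
  (∀ e ∈ net_info, e.1 ∈ keep_node_list →
    ∀ i ∈ (PySem.Dict.ofList e.2).getD "inputs" [],
      pvChainOk net_info keep_node_list (net_info.length + 1) i = true)

instance (net_info : List (String × List (String × List String))) (keep_node_list : List String) : Decidable (Pre_prune_net_info net_info keep_node_list) := by unfold Pre_prune_net_info; infer_instance

def pvWitness_prune_net_info : (List (String × List (String × List String))) × List String :=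
  ([("a", [("inputs", [])]), ("b", [("inputs", ["a"])]), ("c", [("inputs", ["b"])])], ["a", "c"])

def Spec_prune_net_info (net_info : List (String × List (String × List String))) (keep_node_list : List String) (out : List (String × List (String × List String))) : Prop := out = prune_net_info_alt net_info keep_node_list
instance (net_info : List (String × List (String × List String))) (keep_node_list : List String) (out : List (String × List (String × List String))) : Decidable (Spec_prune_net_info net_info keep_node_list out) := by unfold Spec_prune_net_info; infer_instance

-- ===== CLAIM (what is proved, stated in full; the proofs are below) =====
def Claim_equal_prune_net_info : Prop := ∀ (net_info : List (String × List (String × List String))) (keep_node_list : List String), Dom_prune_net_info net_info keep_node_list → Pre_prune_net_info net_info keep_node_list → Spec_prune_net_info net_info keep_node_list (prune_net_info net_info keep_node_list)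

-- ===== LEMMAS AND PROOFS =====

-- a dict built from a dup-free assoc list is that list
theorem pv_items_ofList {I : Type} (l : List (String × I)) (h : (l.map Prod.fst).Nodup) :
    (PySem.Dict.ofList l).items = l := by
  have h2 : ∀ a ∈ l, (PySem.Dict.empty : PySem.Dict String I).contains a.1 = false :=
    fun a _ => PySem.Dict.contains_empty a.1
  have := PySem.Dict.items_foldl_insert_fresh l Prod.fst Prod.snd PySem.Dict.empty h2 h
  simpa [PySem.Dict.ofList, PySem.Dict.update, PySem.Dict.empty] using this

theorem pv_keys_ofList {I : Type} (l : List (String × I)) (h : (l.map Prod.fst).Nodup) :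
    (PySem.Dict.ofList l).keys = l.map Prod.fst := by
  simp [PySem.Dict.keys, pv_items_ofList l h]

theorem pv_get?_ofList {I : Type} (l : List (String × I)) (h : (l.map Prod.fst).Nodup)
    (k : String) (v : I) : (PySem.Dict.ofList l).get? k = some v ↔ (k, v) ∈ l := by
  rw [PySem.Dict.get?_eq_some_iff_mem_items _ _ _ (by rw [pv_keys_ofList l h]; exact h),
    pv_items_ofList l h]

theorem pv_get?_ofList_none {I : Type} (l : List (String × I)) (h : (l.map Prod.fst).Nodup)
    (k : String) : (PySem.Dict.ofList l).get? k = none ↔ k ∉ l.map Prod.fst := by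
  rw [PySem.Dict.get?_eq_none_iff_not_mem_keys, pv_keys_ofList l h]

theorem pv_rev0_items (ni : List (String × List (String × List String)))
    (h : (ni.map Prod.fst).Nodup) : (pvRev0 ni).items = ni.reverse := by
  unfold pvRev0
  have hk : (pvND ni).keys = ni.map Prod.fst := pv_keys_ofList ni h
  have hnodup : ((pvND ni).keys.reverse.map (fun k => k)).Nodup := by
    simpa [hk] using List.nodup_reverse.2 h
  have := PySem.Dict.items_foldl_insert_fresh ((pvND ni).keys.reverse) (fun k => k)
    (fun k => (pvND ni).getD k []) PySem.Dict.empty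
    (fun a _ => PySem.Dict.contains_empty a) hnodup
  have hitems : (pvND ni).items = (pvND ni).keys.map (fun k => (k, (pvND ni).getD k [])) :=
    PySem.Dict.items_eq_map_keys (pvND ni) (by rw [hk]; exact h) []
  calc _ = (pvND ni).keys.reverse.map (fun k => (k, (pvND ni).getD k [])) := by
            simpa [PySem.Dict.empty] using this
    _ = ((pvND ni).keys.map (fun k => (k, (pvND ni).getD k []))).reverse := by
            rw [List.map_reverse]
    _ = ni.reverse := by rw [← hitems]; unfold pvND; rw [pv_items_ofList ni h]

theorem pv_rev0_keys_nodup (ni : List (String × List (String × List String)))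
    (h : (ni.map Prod.fst).Nodup) : (pvRev0 ni).keys.Nodup := by
  simp only [PySem.Dict.keys, pv_rev0_items ni h, List.map_reverse]
  exact List.nodup_reverse.2 h

theorem pv_rev0_get? (ni : List (String × List (String × List String)))
    (h : (ni.map Prod.fst).Nodup) (x : String) :
    (pvRev0 ni).get? x = (pvND ni).get? x := by
  cases hx : (pvND ni).get? x with
  | none =>
    rw [PySem.Dict.get?_eq_none_iff_not_mem_keys] at hx ⊢
    simp only [PySem.Dict.keys, pv_rev0_items ni h, List.map_reverse, List.mem_reverse]
    simp only [pvND] at hx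
    rw [pv_keys_ofList ni h] at hx
    simpa using hx
  | some v =>
    have hmem : (x, v) ∈ ni := (pv_get?_ofList ni h x v).1 hx
    exact (PySem.Dict.get?_eq_some_iff_mem_items _ _ _ (pv_rev0_keys_nodup ni h)).2
      (by rw [pv_rev0_items ni h]; exact List.mem_reverse.2 hmem)

-- fold of conditional inserts: stability when the key never occurs
theorem pv_foldl_if_insert_stable {I J : Type} (c : String × I → Bool) (u : String × I → J)
    (x : String) :
    ∀ (l : List (String × I)) (d : PySem.Dict String J), (∀ p ∈ l, p.1 ≠ x) →
      (l.foldl (fun d p => if c p = true then d.insert p.1 (u p) else d) d).get? x = d.get? x := by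
  intro l
  induction l with
  | nil => intro d _; rfl
  | cons p0 l ih =>
    intro d hne
    rw [List.foldl_cons, ih _ (fun p hp => hne p (List.mem_cons_of_mem _ hp))]
    by_cases hc : c p0 = true
    · simp only [hc, if_true]
      exact PySem.Dict.get?_insert_of_ne d (u p0) (Ne.symm (hne p0 (List.mem_cons_self ..)))
    · simp [hc]

-- fold of conditional inserts: what a lookup sees, for dup-free keys
theorem pv_foldl_if_insert_get? {I J : Type} (c : String × I → Bool) (u : String × I → J) :
    ∀ (l : List (String × I)) (d : PySem.Dict String J), (l.map Prod.fst).Nodup → ∀ k,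
      (l.foldl (fun d p => if c p = true then d.insert p.1 (u p) else d) d).get? k =
      (match l.find? (fun p => p.1 == k) with
       | some p => if c p = true then some (u p) else d.get? k
       | none => d.get? k) := by
  intro l
  induction l with
  | nil => intro d _ k; rfl
  | cons p0 l ih =>
    intro d hnd k
    rw [List.map_cons, List.nodup_cons] at hnd
    obtain ⟨hp0, hnd⟩ := hnd
    by_cases hk : p0.1 = k
    · rw [List.foldl_cons, List.find?_cons_of_pos (by simp [hk])]
      have hstab := pv_foldl_if_insert_stable c u k l
        (if c p0 = true then d.insert p0.1 (u p0) else d)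
        (fun p hp hp1 => hp0 (List.mem_map.2 ⟨p, hp, hp1.trans hk.symm⟩))
      rw [hstab]
      by_cases hc : c p0 = true
      · simp only [hc, if_true]
        rw [← hk]
        exact PySem.Dict.get?_insert_self d p0.1 (u p0)
      · simp [hc]
    · rw [List.foldl_cons, List.find?_cons_of_neg (by simp [hk]), ih _ hnd k]
      have hd' : (if c p0 = true then d.insert p0.1 (u p0) else d).get? k = d.get? k := by
        by_cases hc : c p0 = true
        · simp only [hc, if_true]
          exact PySem.Dict.get?_insert_of_ne d (u p0) (Ne.symm hk)
        · simp [hc]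
      cases hf : l.find? (fun p => p.1 == k) with
      | none => simpa using hd'
      | some p => by_cases hc : c p = true <;> simp [hc, hd']

-- a find? on dup-free keys returns the member itself
theorem pv_find?_eq_of_mem {I : Type} :
    ∀ (l : List (String × I)), (l.map Prod.fst).Nodup →
      ∀ e ∈ l, l.find? (fun p => p.1 == e.1) = some e := by
  intro l
  induction l with
  | nil => intro _ e he; cases he
  | cons p0 l ih =>
    intro hnd e he
    rw [List.map_cons, List.nodup_cons] at hnd
    rcases List.mem_cons.1 he with rfl | he'
    · exact List.find?_cons_of_pos (by simp)
    · have hne : p0.1 ≠ e.1 := fun hh => hnd.1 (hh ▸ List.mem_map.2 ⟨e, he', rfl⟩)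
      rw [List.find?_cons_of_neg (by simp [hne])]
      exact ih hnd.2 e he'

theorem pv_set_append {α : Type} (v : α) (pre : List α) (x : α) (l : List α) :
    (pre ++ x :: l).set pre.length v = pre ++ v :: l := by
  rw [List.set_append]
  simp

-- the A-side index loop is a map (the rewritten value depends only on the element)
theorem pv_rewriteA_go (rev : PySem.Dict String (List (String × List String)))
    (prune : PySem.Set String) (fuel : Nat) :
    ∀ (l pre : List String),
      (PySem.List.pyRange (pre.length : Int) ((pre.length : Int) + (l.length : Int)) 1).foldl
        (fun acc i =>
          if prune.contains (PySem.List.pyGetD acc i "") then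
            acc.set i.toNat
              ((pvDfsA rev prune fuel (PySem.List.pyGetD acc i "")).getD (PySem.List.pyGetD acc i ""))
          else acc)
        (pre ++ l)
      = pre ++ l.map (fun inp =>
          if prune.contains inp then (pvDfsA rev prune fuel inp).getD inp else inp) := by
  intro l
  induction l with
  | nil =>
    intro pre
    rw [show ((pre.length : Int) + ((List.length ([] : List String)) : Int)) = (pre.length : Int)
        by simp]
    rw [PySem.List.pyRange_one_eq_nil (le_refl _)]
    simp
  | cons x l ih =>
    intro pre
    have hlt : (pre.length : Int) < (pre.length : Int) + ((x :: l).length : Int) := by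
      rw [List.length_cons]; push_cast; omega
    rw [PySem.List.pyRange_one_cons hlt, List.foldl_cons]
    have hget : PySem.List.pyGetD (pre ++ x :: l) ((pre.length : Nat) : Int) "" = x := by
      rw [PySem.List.pyGetD_natCast]
      rw [List.getD_eq_getElem?_getD, List.getElem?_append_right (le_refl _)]
      simp
    rw [hget]
    have hstep : (if prune.contains x = true then
          (pre ++ x :: l).set (((pre.length : Nat) : Int)).toNat ((pvDfsA rev prune fuel x).getD x)
        else pre ++ x :: l)
        = pre ++ (if prune.contains x = true then (pvDfsA rev prune fuel x).getD x else x) :: l := by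
      by_cases hx : prune.contains x = true
      · rw [if_pos hx, if_pos hx, Int.toNat_natCast]
        exact pv_set_append _ pre x l
      · rw [if_neg hx, if_neg hx]
    rw [hstep]
    have e1 : ((pre.length : Int) + ((x :: l).length : Int)) =
        (((pre ++ [if prune.contains x = true then (pvDfsA rev prune fuel x).getD x else x]).length : Int)
          + (l.length : Int)) := by
      simp; omega
    have e2 : ((pre.length : Int) + 1) =
        (((pre ++ [if prune.contains x = true then (pvDfsA rev prune fuel x).getD x else x]).length : Int)) := by
      simp
    rw [e1, e2,
      show pre ++ (if prune.contains x = true then (pvDfsA rev prune fuel x).getD x else x) :: l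
        = (pre ++ [if prune.contains x = true then (pvDfsA rev prune fuel x).getD x else x]) ++ l by simp]
    rw [ih (pre ++ [if prune.contains x = true then (pvDfsA rev prune fuel x).getD x else x])]
    simp

theorem pv_rewriteA_eq_map (rev : PySem.Dict String (List (String × List String)))
    (prune : PySem.Set String) (fuel : Nat) (inputs : List String) :
    pvRewriteA rev prune fuel inputs =
      inputs.map (fun inp =>
        if prune.contains inp then (pvDfsA rev prune fuel inp).getD inp else inp) := by
  have := pv_rewriteA_go rev prune fuel inputs []
  simpa [pvRewriteA] using this

theorem pv_pruneSet_contains (ni : List (String × List (String × List String)))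
    (keep : List String) (h : (ni.map Prod.fst).Nodup) (y : String) :
    (pvPruneSet ni keep).contains y = pvIsPruned ni keep y := by
  rw [Bool.eq_iff_iff]
  unfold pvPruneSet pvIsPruned pvND
  rw [pv_keys_ofList ni h]
  constructor
  · intro hc
    have := List.contains_iff_mem.1 hc
    rw [PySem.Set.mem_diff, PySem.Set.mem_ofList, PySem.Set.mem_ofList] at this
    simp only [Bool.and_eq_true, Bool.not_eq_true']
    exact ⟨List.contains_iff_mem.2 this.1, by
      rcases hcc : keep.contains y with _ | _
      · rfl
      · exact absurd (List.contains_iff_mem.1 hcc) this.2⟩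
  · intro hc
    simp only [Bool.and_eq_true, Bool.not_eq_true'] at hc
    apply List.contains_iff_mem.2
    rw [PySem.Set.mem_diff, PySem.Set.mem_ofList, PySem.Set.mem_ofList]
    exact ⟨List.contains_iff_mem.1 hc.1, fun hy => by
      rw [List.contains_iff_mem.2 hy] at hc; exact absurd hc.2 (by simp)⟩

theorem pv_keepSet_contains (keep : List String) (y : String) :
    (PySem.Set.ofList keep).contains y = keep.contains y := by
  rw [Bool.eq_iff_iff]
  constructor
  · intro hc
    exact List.contains_iff_mem.2 ((PySem.Set.mem_ofList keep y).1 (List.contains_iff_mem.1 hc))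
  · intro hc
    exact List.contains_iff_mem.2 ((PySem.Set.mem_ofList keep y).2 (List.contains_iff_mem.1 hc))

theorem pv_keepSet_contains_false (keep : List String) {y : String} (h : y ∉ keep) :
    (PySem.Set.ofList keep).contains y = false := by
  rw [pv_keepSet_contains]
  cases hc : keep.contains y
  · rfl
  · exact absurd (List.contains_iff_mem.1 hc) h

theorem pv_isPruned_iff (ni : List (String × List (String × List String))) (keep : List String)
    (x : String) : pvIsPruned ni keep x = true ↔ (x ∈ ni.map Prod.fst ∧ x ∉ keep) := by
  unfold pvIsPruned
  rw [Bool.and_eq_true, Bool.not_eq_true']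
  constructor
  · rintro ⟨ha, hb⟩
    refine ⟨List.contains_iff_mem.1 ha, fun hm => ?_⟩
    rw [List.contains_iff_mem.2 hm] at hb
    cases hb
  · rintro ⟨ha, hb⟩
    refine ⟨List.contains_iff_mem.2 ha, ?_⟩
    cases hc : keep.contains x
    · rfl
    · exact absurd (List.contains_iff_mem.1 hc) hb

-- one _dfs step, with both lookups resolved
theorem pv_dfsA_succ (rev : PySem.Dict String (List (String × List String)))
    (prune : PySem.Set String) (m : Nat) (name : String)
    (info : List (String × List String)) (inp : String)
    (hs : rev.get? name = some info)
    (hi : (PySem.Dict.ofList info).get? "inputs" = some [inp]) :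
    pvDfsA rev prune (m+1) name =
      if prune.contains inp = true then pvDfsA rev prune m inp else some inp := by
  simp only [pvDfsA, hs, hi]

-- ----- B-side machinery: the base successor dict, doubling, and the chase -----

-- the pruned-chain successor of x: its single input, if x is a pruned single-input node
def pvSucc? (net_info : List (String × List (String × List String)))
    (keep_node_list : List String) (x : String) : Option String :=
  match net_info.find? (fun e => e.1 == x) with
  | none => none
  | some e =>
    if keep_node_list.contains x then none
    else
      match (PySem.Dict.ofList e.2).getD "inputs" [] with
      | [i] => some i
      | _ => none

-- the chase itself (proof-side characterisation of a resolved chain)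
def pvChase (ni : List (String × List (String × List String))) (keep : List String) :
    Nat → String → String
  | 0, x => x
  | f+1, x =>
    match pvSucc? ni keep x with
    | none => x
    | some y => pvChase ni keep f y

theorem pv_chase_none (ni : List (String × List (String × List String))) (keep : List String)
    {x : String} (h : pvSucc? ni keep x = none) : ∀ m, pvChase ni keep m x = x := by
  intro m
  cases m with
  | zero => rfl
  | succ f => simp [pvChase, h]

theorem pv_chase_add (ni : List (String × List (String × List String))) (keep : List String) :
    ∀ (m n : Nat) (x : String), pvChase ni keep (m + n) x = pvChase ni keep n (pvChase ni keep m x) := by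
  intro m
  induction m with
  | zero => intro n x; simp [pvChase]
  | succ f ih =>
    intro n x
    rw [show f + 1 + n = (f + n) + 1 by omega]
    cases hs : pvSucc? ni keep x with
    | none =>
      rw [pv_chase_none ni keep hs, pv_chase_none ni keep hs, pv_chase_none ni keep hs]
    | some y =>
      simp only [pvChase, hs]
      exact ih n y

-- pvSucc? is none outside the pruned single-input nodes
theorem pv_succ_none_of_not_pruned (ni : List (String × List (String × List String)))
    (keep : List String) {y : String} (h : pvIsPruned ni keep y = false) :
    pvSucc? ni keep y = none := by
  unfold pvSucc?
  cases hf : ni.find? (fun e => e.1 == y) with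
  | none => rfl
  | some e =>
    have hy : e.1 = y := by
      have := List.find?_some hf
      simpa using this
    have hmem : y ∈ ni.map Prod.fst :=
      List.mem_map.2 ⟨e, List.mem_of_find?_eq_some hf, hy⟩
    by_cases hk : y ∈ keep
    · have hc : keep.contains y = true := List.contains_iff_mem.2 hk
      rw [hc]
      simp
    · rw [(pv_isPruned_iff ni keep y).2 ⟨hmem, hk⟩] at h
      cases h

-- one pvChainOk step on a pruned node, fully destructed
theorem pv_chainOk_step (ni : List (String × List (String × List String))) (keep : List String)
    {f : Nat} {x : String} (h : pvChainOk ni keep (f+1) x = true)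
    (hp : pvIsPruned ni keep x = true) :
    ∃ e i, ni.find? (fun e' => e'.1 == x) = some e ∧
      (PySem.Dict.ofList e.2).getD "inputs" [] = [i] ∧
      pvChainOk ni keep f i = true ∧ pvSucc? ni keep x = some i := by
  rw [show pvChainOk ni keep (f+1) x
      = (if pvIsPruned ni keep x then
          match ni.find? (fun e => e.1 == x) with
          | none => false
          | some e =>
            match (PySem.Dict.ofList e.2).getD "inputs" [] with
            | [i] => pvChainOk ni keep f i
            | _ => false
        else true) from rfl, hp, if_pos rfl] at h
  cases hf : ni.find? (fun e => e.1 == x) with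
  | none => exact (Bool.false_ne_true (by simpa only [hf] using h)).elim
  | some e =>
    simp only [hf] at h
    rcases hl : (PySem.Dict.ofList e.2).getD "inputs" [] with _ | ⟨i, _ | ⟨b, t⟩⟩ <;>
      simp only [hl] at h
    · exact (Bool.false_ne_true h).elim
    · have hk' : keep.contains x = false := by
        have := ((pv_isPruned_iff ni keep x).1 hp).2
        cases hc : keep.contains x
        · rfl
        · exact absurd (List.contains_iff_mem.1 hc) this
      refine ⟨e, i, rfl, hl, h, ?_⟩
      unfold pvSucc?
      simp only [hf, hk', hl]
      simp
    · exact (Bool.false_ne_true h).elim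

theorem pv_chainOk_chase (ni : List (String × List (String × List String))) (keep : List String) :
    ∀ (g : Nat) (x : String), pvChainOk ni keep g x = true →
      pvSucc? ni keep (pvChase ni keep g x) = none := by
  intro g
  induction g with
  | zero => intro x h; cases h
  | succ f ih =>
    intro x h
    cases hp : pvIsPruned ni keep x with
    | false =>
      have hs := pv_succ_none_of_not_pruned ni keep hp
      rw [pv_chase_none ni keep hs]
      exact hs
    | true =>
      obtain ⟨e, i, _, _, hok, hs⟩ := pv_chainOk_step ni keep h hp
      simp only [pvChase, hs]
      exact ih i hok

theorem pv_chase_stable (ni : List (String × List (String × List String))) (keep : List String)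
    {g : Nat} {x : String} (h : pvChainOk ni keep g x = true) :
    ∀ m, g ≤ m → pvChase ni keep m x = pvChase ni keep g x := by
  intro m hm
  rw [show m = g + (m - g) by omega, pv_chase_add,
    pv_chase_none ni keep (pv_chainOk_chase ni keep g x h)]

-- the conditional-insert shape of B's first loop
def pvCB (keepS : PySem.Set String) (p : String × List (String × List String)) : Bool :=
  !keepS.contains p.1 &&
    (match (PySem.Dict.ofList p.2).getD "inputs" [] with
     | [_] => true
     | _ => false)

def pvUB (p : String × List (String × List String)) : String :=
  match (PySem.Dict.ofList p.2).getD "inputs" [] with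
  | [i] => i
  | _ => ""

theorem pv_stepB_eq (keepS : PySem.Set String) :
    pvStepB keepS = (fun r p => if pvCB keepS p = true then r.insert p.1 (pvUB p) else r) := by
  funext r p
  unfold pvStepB pvCB pvUB
  cases keepS.contains p.1 with
  | true => simp
  | false =>
    rcases (PySem.Dict.ofList p.2).getD "inputs" [] with _ | ⟨a, _ | ⟨b, t⟩⟩ <;> simp

theorem pv_base_get (ni : List (String × List (String × List String))) (keep : List String)
    (h1 : (ni.map Prod.fst).Nodup) (x : String) :
    (pvBaseB ni keep).get? x = pvSucc? ni keep x := by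
  unfold pvBaseB
  rw [pv_items_ofList ni h1, pv_stepB_eq,
    pv_foldl_if_insert_get? (pvCB (PySem.Set.ofList keep)) pvUB ni PySem.Dict.empty h1 x]
  unfold pvSucc?
  cases hf : ni.find? (fun e => e.1 == x) with
  | none => simp [PySem.Dict.get?_empty]
  | some e =>
    have hx : e.1 = x := by
      have := List.find?_some hf
      simpa using this
    have hks : (PySem.Set.ofList keep).contains e.1 = keep.contains x := by
      rw [hx, pv_keepSet_contains]
    cases hk : keep.contains x with
    | true =>
      have hcb : pvCB (PySem.Set.ofList keep) e = false := by
        unfold pvCB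
        rw [hks, hk]
        rfl
      simp only [hcb]
      simp [PySem.Dict.get?_empty]
    | false =>
      rcases hl : (PySem.Dict.ofList e.2).getD "inputs" [] with _ | ⟨a, _ | ⟨b, t⟩⟩ <;>
        · unfold pvCB pvUB
          simp only [hks, hk, hl]
          simp [PySem.Dict.get?_empty]

theorem pv_base_keys_nodup (ni : List (String × List (String × List String))) (keep : List String)
    (h1 : (ni.map Prod.fst).Nodup) : (pvBaseB ni keep).keys.Nodup := by
  unfold pvBaseB
  rw [pv_items_ofList ni h1, pv_stepB_eq]
  simp only [PySem.List.foldl_if_eq_foldl_filter]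
  exact PySem.Dict.nodup_keys_foldl_insert_key _ Prod.fst (fun _ p => pvUB p) _
    PySem.Dict.nodup_keys_empty

theorem pv_double_keys (d : PySem.Dict String String) (h : d.keys.Nodup) :
    (pvDouble d).keys = d.keys := by
  unfold pvDouble
  have hmap : ((d.items.map (fun p => (p.1, d.getD p.2 p.2))).map Prod.fst) = d.keys := by
    rw [List.map_map]
    rfl
  rw [PySem.Dict.keys, pv_items_ofList _ (by rw [hmap]; exact h), hmap]

theorem pv_double_get (d : PySem.Dict String String) (h : d.keys.Nodup) (x : String) :
    (pvDouble d).get? x = (d.get? x).map (fun v => d.getD v v) := by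
  have hmap : ((d.items.map (fun p => (p.1, d.getD p.2 p.2))).map Prod.fst) = d.keys := by
    rw [List.map_map]
    rfl
  cases hx : d.get? x with
  | none =>
    rw [PySem.Dict.get?_eq_none_iff_not_mem_keys] at hx
    unfold pvDouble
    rw [Option.map_none]
    rw [pv_get?_ofList_none _ (by rw [hmap]; exact h), hmap]
    exact hx
  | some v =>
    have hmem : (x, v) ∈ d.items := (PySem.Dict.get?_eq_some_iff_mem_items _ _ _ h).1 hx
    unfold pvDouble
    rw [Option.map_some]
    exact (pv_get?_ofList _ (by rw [hmap]; exact h) x (d.getD v v)).2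
      (List.mem_map.2 ⟨(x, v), hmem, rfl⟩)

-- the doubling iteration: keys are the base's, and each round squares the skip distance
theorem pv_iter_keys (ni : List (String × List (String × List String))) (keep : List String)
    (h1 : (ni.map Prod.fst).Nodup) :
    ∀ k, ((List.range k).foldl (fun d _ => pvDouble d) (pvBaseB ni keep)).keys
      = (pvBaseB ni keep).keys := by
  intro k
  induction k with
  | zero => rfl
  | succ f ih =>
    rw [List.range_succ, List.foldl_append, List.foldl_cons, List.foldl_nil,
      pv_double_keys _ (by rw [ih]; exact pv_base_keys_nodup ni keep h1), ih]

theorem pv_iter_get (ni : List (String × List (String × List String))) (keep : List String)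
    (h1 : (ni.map Prod.fst).Nodup) :
    ∀ (k : Nat) (x : String),
      ((List.range k).foldl (fun d _ => pvDouble d) (pvBaseB ni keep)).get? x
        = (pvSucc? ni keep x).map (fun _ => pvChase ni keep (2 ^ k) x) := by
  intro k
  induction k with
  | zero =>
    intro x
    rw [List.range_zero, List.foldl_nil, pv_base_get ni keep h1 x]
    cases hs : pvSucc? ni keep x with
    | none => rfl
    | some y => simp [pvChase, hs]
  | succ f ih =>
    intro x
    have hnd : ((List.range f).foldl (fun d _ => pvDouble d) (pvBaseB ni keep)).keys.Nodup := by
      rw [pv_iter_keys ni keep h1]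
      exact pv_base_keys_nodup ni keep h1
    rw [List.range_succ, List.foldl_append, List.foldl_cons, List.foldl_nil,
      pv_double_get _ hnd x, ih x]
    have hgd : ∀ y, ((List.range f).foldl (fun d _ => pvDouble d) (pvBaseB ni keep)).getD y y
        = pvChase ni keep (2 ^ f) y := by
      intro y
      rw [PySem.Dict.getD_eq_get?_getD, ih y]
      cases hs : pvSucc? ni keep y with
      | none => rw [Option.map_none, Option.getD_none, pv_chase_none ni keep hs]
      | some z => rfl
    cases hs : pvSucc? ni keep x with
    | none => rfl
    | some y =>
      rw [Option.map_some, Option.map_some, Option.map_some, hgd]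
      rw [show 2 ^ (f + 1) = 2 ^ f + 2 ^ f by rw [pow_succ]; omega, pv_chase_add]

theorem pv_nxt_getD (ni : List (String × List (String × List String))) (keep : List String)
    (h1 : (ni.map Prod.fst).Nodup) (y : String) :
    (pvNxtB ni keep).getD y y = pvChase ni keep (2 ^ pvRounds ni) y := by
  unfold pvNxtB
  rw [PySem.Dict.getD_eq_get?_getD, pv_iter_get ni keep h1 (pvRounds ni) y]
  cases hs : pvSucc? ni keep y with
  | none => rw [Option.map_none, Option.getD_none, pv_chase_none ni keep hs]
  | some z => rfl

theorem pv_rounds_bound (ni : List (String × List (String × List String)))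
    (h1 : (ni.map Prod.fst).Nodup) : ni.length + 1 ≤ 2 ^ pvRounds ni := by
  unfold pvRounds
  have hsz : (PySem.Dict.ofList ni).size = ni.length := by
    rw [PySem.Dict.size, pv_items_ofList ni h1]
  rw [hsz]
  have hlt := PySem.Int.lt_two_pow_bitLength ((max 1 ni.length : Nat) : Int)
  rw [Int.natAbs_natCast] at hlt
  have := le_max_right 1 ni.length
  omega

-- THE HEART: A's _dfs computes exactly the chase of the pruned chain
theorem pv_dfs_chase (ni : List (String × List (String × List String))) (keep : List String)
    (h1 : (ni.map Prod.fst).Nodup) :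
    ∀ (g : Nat) (x : String), pvChainOk ni keep g x = true →
      pvIsPruned ni keep x = true →
      ∀ fuel, g ≤ fuel →
        pvDfsA (pvRev0 ni) (pvPruneSet ni keep) fuel x = some (pvChase ni keep g x) := by
  intro g
  induction g with
  | zero => intro x h; cases h
  | succ f ih =>
    intro x hok hpruned fuel hfuel
    obtain ⟨e, i, hf, hgd, hchain, hsucc⟩ := pv_chainOk_step ni keep hok hpruned
    have hex : e.1 = x := by
      have := List.find?_some hf
      simpa using this
    have he : e ∈ ni := List.mem_of_find?_eq_some hf
    have hget : (PySem.Dict.ofList e.2).get? "inputs" = some [i] := by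
      cases ho : (PySem.Dict.ofList e.2).get? "inputs" with
      | none =>
        rw [PySem.Dict.getD_eq_get?_getD, ho, Option.getD_none] at hgd
        cases hgd
      | some v =>
        rw [PySem.Dict.getD_eq_get?_getD, ho, Option.getD_some] at hgd
        rw [hgd]
    have hchase : pvChase ni keep (f + 1) x = pvChase ni keep f i := by
      simp [pvChase, hsucc]
    obtain ⟨m, rfl⟩ : ∃ m, fuel = m + 1 := ⟨fuel - 1, by omega⟩
    have hrev0x : (pvRev0 ni).get? x = some e.2 := by
      rw [pv_rev0_get? ni h1 x]
      show (PySem.Dict.ofList ni).get? x = some e.2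
      exact (pv_get?_ofList ni h1 x e.2).2 (by rw [← hex]; exact he)
    rw [pv_dfsA_succ _ _ m x e.2 i hrev0x hget, hchase]
    by_cases hp : (pvPruneSet ni keep).contains i = true
    · rw [if_pos hp]
      have hpi : pvIsPruned ni keep i = true := by
        rw [← pv_pruneSet_contains ni keep h1 i]; exact hp
      exact ih i hchain hpi m (by omega)
    · rw [if_neg hp]
      have hpi : pvIsPruned ni keep i = false := by
        cases hb : pvIsPruned ni keep i
        · rfl
        · rw [← pv_pruneSet_contains ni keep h1 i] at hb
          exact absurd hb hp
      rw [pv_chase_none ni keep (pv_succ_none_of_not_pruned ni keep hpi)]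

-- ----- A-side plumbing for the middle and final loops -----

theorem pv_stepMidA_eq (rev : PySem.Dict String (List (String × List String)))
    (prune : PySem.Set String) (fuel : Nat) :
    pvStepMidA rev prune fuel = (fun d p =>
      if ((!prune.contains p.1) && ((PySem.Dict.ofList p.2).get? "inputs").isSome) = true then
        d.insert p.1 ((PySem.Dict.ofList p.2).insert "inputs"
          (pvRewriteA rev prune fuel (((PySem.Dict.ofList p.2).get? "inputs").getD []))).items
      else d) := by
  funext d p
  unfold pvStepMidA
  by_cases hc : prune.contains p.1 = true
  · rw [if_pos hc, hc]
    rfl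
  · have hc' : prune.contains p.1 = false := by
      cases h : prune.contains p.1
      · rfl
      · exact absurd h hc
    rw [if_neg hc, hc']
    cases (PySem.Dict.ofList p.2).get? "inputs" with
    | none => rfl
    | some v => rfl

theorem pv_items_foldl_insert_fresh' {J : Type} (l : List String) (v : String → J)
    (h : l.Nodup) :
    (l.foldl (fun acc k => acc.insert k (v k)) (PySem.Dict.empty : PySem.Dict String J)).items
      = l.map (fun k => (k, v k)) := by
  have := PySem.Dict.items_foldl_insert_fresh l (fun k => k) v PySem.Dict.empty
    (fun a _ => PySem.Dict.contains_empty a) (by simpa using h)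
  simpa [PySem.Dict.empty] using this

theorem pv_items_foldl_insert_fresh2 {I J : Type} (l : List (String × I)) (v : String × I → J)
    (h : (l.map Prod.fst).Nodup) :
    (l.foldl (fun acc p => acc.insert p.1 (v p)) (PySem.Dict.empty : PySem.Dict String J)).items
      = l.map (fun p => (p.1, v p)) := by
  have := PySem.Dict.items_foldl_insert_fresh l Prod.fst v PySem.Dict.empty
    (fun a _ => PySem.Dict.contains_empty a.1) h
  simpa [PySem.Dict.empty] using this

theorem pv_isSome_inputs (ni : List (String × List (String × List String)))
    (h2 : ∀ e ∈ ni, (e.2.map Prod.fst).Nodup) {e : String × List (String × List String)}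
    (he : e ∈ ni) (hk : "inputs" ∈ e.2.map Prod.fst) :
    ((PySem.Dict.ofList e.2).get? "inputs").isSome = true := by
  cases ho : (PySem.Dict.ofList e.2).get? "inputs" with
  | none => exact absurd ((pv_get?_ofList_none e.2 (h2 e he) "inputs").1 ho) (by simpa using hk)
  | some v => rfl

theorem pv_isPruned_false_of_keep (ni : List (String × List (String × List String)))
    (keep : List String) {y : String} (hk : y ∈ keep) : pvIsPruned ni keep y = false := by
  cases hb : pvIsPruned ni keep y
  · rfl
  · exact absurd hk ((pv_isPruned_iff ni keep y).1 hb).2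

-- ===== VERDICT (by name: the statement is the Claim_ definition above) =====
theorem prune_net_info_spec : Claim_equal_prune_net_info := by
  unfold Claim_equal_prune_net_info
  intro ni keep _ hpre
  unfold Spec_prune_net_info
  obtain ⟨h1, h2, h3, h4⟩ := hpre
  -- A side: the final loop is a fresh-insert over the kept keys
  unfold prune_net_info
  have hAstep : (fun (acc : PySem.Dict String (List (String × List String))) k =>
        if (pvPruneSet ni keep).contains k then acc
        else acc.insert k ((pvRev1 ni keep).getD k []))
      = (fun acc k =>
        if (!(pvPruneSet ni keep).contains k) = true then
          acc.insert k ((pvRev1 ni keep).getD k []) else acc) := by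
    funext acc k
    by_cases hc : (pvPruneSet ni keep).contains k = true
    · rw [if_pos hc, hc]
      rfl
    · have hc' : (pvPruneSet ni keep).contains k = false := by
        cases h : (pvPruneSet ni keep).contains k
        · rfl
        · exact absurd h hc
      rw [if_neg hc, hc']
      rfl
  rw [hAstep, PySem.List.foldl_if_eq_foldl_filter (fun k => !(pvPruneSet ni keep).contains k)
      (fun (acc : PySem.Dict String (List (String × List String))) k =>
        acc.insert k ((pvRev1 ni keep).getD k []))]
  simp only [pvND]
  rw [pv_keys_ofList ni h1,
    pv_items_foldl_insert_fresh' _ _ (List.Nodup.filter _ h1),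
    List.filter_map, List.map_map]
  -- B side: likewise
  unfold prune_net_info_alt
  have hBstep : (fun (acc : PySem.Dict String (List (String × List String)))
      (p : String × List (String × List String)) =>
      if (PySem.Set.ofList keep).contains p.1 then
        match (PySem.Dict.ofList p.2).get? "inputs" with
        | none => acc
        | some inputs =>
          acc.insert p.1
            ((PySem.Dict.ofList p.2).insert "inputs"
              (inputs.map (fun x => (pvNxtB ni keep).getD x x))).items
      else acc)
    = (fun (acc : PySem.Dict String (List (String × List String)))
      (p : String × List (String × List String)) =>
      if ((PySem.Set.ofList keep).contains p.1
            && ((PySem.Dict.ofList p.2).get? "inputs").isSome) = true then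
        acc.insert p.1 ((PySem.Dict.ofList p.2).insert "inputs"
          ((((PySem.Dict.ofList p.2).get? "inputs").getD []).map
            (fun x => (pvNxtB ni keep).getD x x))).items
      else acc) := by
    funext acc p
    by_cases hc : (PySem.Set.ofList keep).contains p.1 = true
    · rw [if_pos hc, hc]
      cases (PySem.Dict.ofList p.2).get? "inputs" with
      | none => rfl
      | some v => rfl
    · have hc' : (PySem.Set.ofList keep).contains p.1 = false := by
        cases h : (PySem.Set.ofList keep).contains p.1
        · rfl
        · exact absurd h hc
      rw [if_neg hc, hc']
      rfl
  rw [pv_items_ofList ni h1, hBstep,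
    PySem.List.foldl_if_eq_foldl_filter
      (fun (p : String × List (String × List String)) =>
        (PySem.Set.ofList keep).contains p.1
        && ((PySem.Dict.ofList p.2).get? "inputs").isSome)
      (fun (acc : PySem.Dict String (List (String × List String)))
        (p : String × List (String × List String)) =>
        acc.insert p.1 ((PySem.Dict.ofList p.2).insert "inputs"
        ((((PySem.Dict.ofList p.2).get? "inputs").getD []).map
          (fun x => (pvNxtB ni keep).getD x x))).items),
    pv_items_foldl_insert_fresh2 _ _
      (List.Nodup.sublist (List.Sublist.map Prod.fst List.filter_sublist) h1)]
  -- the two filters select the same (kept) entries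
  have hfc : ni.filter ((fun k => !(pvPruneSet ni keep).contains k) ∘ Prod.fst)
      = ni.filter (fun p => (PySem.Set.ofList keep).contains p.1
          && ((PySem.Dict.ofList p.2).get? "inputs").isSome) := by
    apply List.filter_congr
    intro e he
    show (!(pvPruneSet ni keep).contains e.1) = _
    rw [pv_pruneSet_contains ni keep h1]
    by_cases hek : e.1 ∈ keep
    · rw [pv_isPruned_false_of_keep ni keep hek,
        pv_isSome_inputs ni h2 he (h3 e he hek),
        pv_keepSet_contains, List.contains_iff_mem.2 hek]
      rfl
    · rw [(pv_isPruned_iff ni keep e.1).2 ⟨List.mem_map.2 ⟨e, he, rfl⟩, hek⟩,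
        pv_keepSet_contains_false keep hek]
      rfl
  rw [hfc]
  apply List.map_congr_left
  intro e hef
  have he : e ∈ ni := (List.mem_filter.1 hef).1
  have hcB := (List.mem_filter.1 hef).2
  rw [Bool.and_eq_true] at hcB
  obtain ⟨hksT, hsome⟩ := hcB
  obtain ⟨inputs, hi⟩ := Option.isSome_iff_exists.1 hsome
  -- the entry A stores for a kept key
  have hcond : ((!(pvPruneSet ni keep).contains e.1)
      && ((PySem.Dict.ofList e.2).get? "inputs").isSome) = true := by
    rw [pv_pruneSet_contains ni keep h1,
      pv_isPruned_false_of_keep ni keep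
        (List.contains_iff_mem.1 (by rw [← pv_keepSet_contains]; exact hksT)),
      hsome]
    rfl
  have hndrev : ((ni.reverse).map Prod.fst).Nodup := by
    rw [List.map_reverse]
    exact List.nodup_reverse.2 h1
  have hrev1 : (pvRev1 ni keep).get? e.1 =
      some (((PySem.Dict.ofList e.2).insert "inputs"
        (pvRewriteA (pvRev0 ni) (pvPruneSet ni keep) (ni.length + 1)
          (((PySem.Dict.ofList e.2).get? "inputs").getD []))).items) := by
    unfold pvRev1
    rw [pv_stepMidA_eq, pv_rev0_items ni h1,
      pv_foldl_if_insert_get?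
        (fun p => (!(pvPruneSet ni keep).contains p.1)
          && ((PySem.Dict.ofList p.2).get? "inputs").isSome)
        (fun p => ((PySem.Dict.ofList p.2).insert "inputs"
          (pvRewriteA (pvRev0 ni) (pvPruneSet ni keep) (ni.length + 1)
            (((PySem.Dict.ofList p.2).get? "inputs").getD []))).items)
        (ni.reverse) (pvRev0 ni) hndrev e.1,
      pv_find?_eq_of_mem (ni.reverse) hndrev e (List.mem_reverse.2 he)]
    show (if ((!(pvPruneSet ni keep).contains e.1)
        && ((PySem.Dict.ofList e.2).get? "inputs").isSome) = true then
          some (((PySem.Dict.ofList e.2).insert "inputs"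
            (pvRewriteA (pvRev0 ni) (pvPruneSet ni keep) (ni.length + 1)
              (((PySem.Dict.ofList e.2).get? "inputs").getD []))).items)
        else (pvRev0 ni).get? e.1) = _
    rw [if_pos hcond]
  simp only [Function.comp_apply]
  refine Prod.ext rfl ?_
  show (pvRev1 ni keep).getD e.1 [] = _
  rw [PySem.Dict.getD_eq_get?_getD, hrev1, Option.getD_some, pv_rewriteA_eq_map]
  congr 1
  congr 1
  apply List.map_congr_left
  intro y hy
  rw [pv_nxt_getD ni keep h1 y]
  by_cases hc : (pvPruneSet ni keep).contains y = true
  · have hpruned : pvIsPruned ni keep y = true := by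
      rw [← pv_pruneSet_contains ni keep h1 y]; exact hc
    have hok : pvChainOk ni keep (ni.length + 1) y = true :=
      h4 e he (List.contains_iff_mem.1 (by rw [← pv_keepSet_contains]; exact hksT)) y
        (by rw [PySem.Dict.getD_eq_get?_getD]; exact hy)
    rw [if_pos hc,
      pv_dfs_chase ni keep h1 (ni.length + 1) y hok hpruned (ni.length + 1) le_rfl,
      Option.getD_some,
      pv_chase_stable ni keep hok (2 ^ pvRounds ni) (pv_rounds_bound ni h1)]
  · have hpy : pvIsPruned ni keep y = false := by
      cases hb : pvIsPruned ni keep y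
      · rfl
      · rw [← pv_pruneSet_contains ni keep h1 y] at hb
        exact absurd hb hc
    rw [if_neg hc, pv_chase_none ni keep (pv_succ_none_of_not_pruned ni keep hpy)]
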